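-- pv_equiv track=rewrite | github.com/KameshEas/Instgram-Growth-Bot | src/services/prompt_quality_auditor.py | _count_redundancy
-- ===== SOURCE A (Python) =====
-- def _count_redundancy(prompt: str) -> int:
--     """Count repeated concepts in prompt"""
--     words = prompt.lower().split()
--     word_freq = {}
--     for word in words:
--         # Only count content words (>3 chars)
--         if len(word) > 3:
--             word_freq[word] = word_freq.get(word, 0) + 1
--
--     # Count words appearing 3+ times
--     redundancy = sum(1 for count in word_freq.values() if count >= 3)
--     return redundancy
-- ===== SOURCE B (Python) =====
-- def _count_redundancy(prompt: str) -> int: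
--     """Count repeated concepts in prompt (sort-then-scan grouping)."""
--     content = sorted(w for w in prompt.lower().split() if len(w) > 3)
--     redundancy = 0
--     cur = None
--     run = 0
--     for w in content:
--         if w == cur:
--             run += 1
--         else:
--             if run >= 3:
--                 redundancy += 1
--             cur = w
--             run = 1
--     if run >= 3:
--         redundancy += 1
--     return redundancy
-- ===== Notes on version B (the rewrite author's own statement) =====
-- stated objective: alternative
-- what changed: Replaces the hash-frequency-dict pass plus a values scan by sorting the filtered content words and counting runs of length >= 3 in one scan over the sorted list.
import Mathlib
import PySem

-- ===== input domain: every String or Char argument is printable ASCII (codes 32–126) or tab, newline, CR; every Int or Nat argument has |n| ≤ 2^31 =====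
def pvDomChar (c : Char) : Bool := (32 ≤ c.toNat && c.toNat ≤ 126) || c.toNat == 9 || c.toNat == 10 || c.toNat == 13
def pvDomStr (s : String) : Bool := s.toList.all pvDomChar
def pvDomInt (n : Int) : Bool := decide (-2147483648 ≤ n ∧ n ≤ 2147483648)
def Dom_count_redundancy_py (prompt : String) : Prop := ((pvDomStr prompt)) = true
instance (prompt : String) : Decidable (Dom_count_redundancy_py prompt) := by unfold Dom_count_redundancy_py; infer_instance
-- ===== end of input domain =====

-- B replaces A's hash-frequency dict and values scan by sorting the filtered content words
-- and counting runs of length ≥ 3 in one scan over the sorted list (alternative algorithm, same results).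

-- ===== PORT A =====
def count_redundancy_py (prompt : String) : Int :=
  let words := PySem.Str.split₀ (PySem.Str.lower prompt)
  let word_freq := words.foldl
    (fun d w => if 3 < PySem.Str.len w then d.insert w (d.getD w 0 + 1) else d)
    (PySem.Dict.empty : PySem.Dict String Int)
  word_freq.values.foldl (fun acc c => if 3 ≤ c then acc + 1 else acc) 0

-- ===== PORT B =====
-- one step of B's run-length scan: state (redundancy, current word, run length)
def pvStep (st : Int × Option String × Int) (w : String) : Int × Option String × Int :=
  if some w = st.2.1 then (st.1, st.2.1, st.2.2 + 1)
  else ((if 3 ≤ st.2.2 then st.1 + 1 else st.1), some w, 1)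

def count_redundancy_py_alt (prompt : String) : Int :=
  let content := PySem.List.sorted
    ((PySem.Str.split₀ (PySem.Str.lower prompt)).filter (fun w => 3 < PySem.Str.len w))
    (fun x => x) false
  let st := content.foldl pvStep (0, none, 0)
  if 3 ≤ st.2.2 then st.1 + 1 else st.1

-- ===== PRECONDITION & SPEC =====
def Spec_count_redundancy_py (prompt : String) (out : Int) : Prop := out = count_redundancy_py_alt prompt
instance (prompt : String) (out : Int) : Decidable (Spec_count_redundancy_py prompt out) := by unfold Spec_count_redundancy_py; infer_instance

-- ===== CLAIM (what is proved, stated in full; the proofs are below) =====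
def Claim_equal_count_redundancy_py : Prop := ∀ (prompt : String), Dom_count_redundancy_py prompt → Spec_count_redundancy_py prompt (count_redundancy_py prompt)

-- ===== LEMMAS AND PROOFS =====

-- spec of a grouped scan: number of distinct words with multiplicity ≥ 3
def pvG : List String → Int
  | [] => 0
  | w :: t => (if 3 ≤ 1 + (t.count w : Int) then 1 else 0) + pvG (t.filter (fun x => decide (x ≠ w)))
termination_by l => l.length
decreasing_by
  simp only [List.length_cons, List.length_unattach, Nat.lt_succ_iff]
  exact le_trans (List.length_filter_le _ _) (by simp)

lemma pvFold : ∀ (l : List String), l.Pairwise (· ≤ ·) →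
    ∀ (red : Int) (c : String) (run : Int), 1 ≤ run → (∀ x ∈ l, c ≤ x) →
    (if 3 ≤ (l.foldl pvStep (red, some c, run)).2.2 then (l.foldl pvStep (red, some c, run)).1 + 1
     else (l.foldl pvStep (red, some c, run)).1)
      = red + (if 3 ≤ run + (l.count c : Int) then 1 else 0)
          + pvG (l.filter (fun x => decide (x ≠ c))) := by
  intro l
  induction l with
  | nil =>
      intro _ red c run h1 _
      simp [pvG]
      split_ifs <;> omega
  | cons w t ih =>
      intro hp red c run h1 h2
      have hw : ∀ x ∈ t, w ≤ x := (List.pairwise_cons.mp hp).1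
      have hpt : t.Pairwise (· ≤ ·) := (List.pairwise_cons.mp hp).2
      have hcw : c ≤ w := h2 w (by simp)
      by_cases hwc : w = c
      · subst hwc
        have hstep : pvStep (red, some w, run) w = (red, some w, run + 1) := by
          simp [pvStep]
        rw [List.foldl_cons, hstep, ih hpt red w (run + 1) (by omega) hw]
        have hfil : (List.filter (fun x => decide (x ≠ w)) (w :: t))
            = List.filter (fun x => decide (x ≠ w)) t := by
          simp
        rw [hfil, List.count_cons_self]
        have hcast : run + 1 + ((t.count w : Nat) : Int) = run + (((t.count w + 1 : Nat)) : Int) := by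
          push_cast; ring
        rw [hcast]
      · have hlt : c < w := lt_of_le_of_ne hcw (fun e => hwc e.symm)
        have hstep : pvStep (red, some c, run) w
            = ((if 3 ≤ run then red + 1 else red), some w, 1) := by
          have : ¬ (some w = some c) := by
            intro e; exact hwc (Option.some_inj.mp e)
          simp [pvStep, this]
        rw [List.foldl_cons, hstep, ih hpt _ w 1 le_rfl hw]
        have hcnt : (w :: t).count c = 0 := by
          rw [List.count_eq_zero]
          intro hc
          rcases List.mem_cons.mp hc with e | hc'
          · exact absurd e.symm hwc
          · exact absurd (hw c hc') (not_le.mpr hlt)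
        have hfil : (List.filter (fun x => decide (x ≠ c)) (w :: t)) = w :: t := by
          rw [List.filter_eq_self]
          intro x hx
          rcases List.mem_cons.mp hx with e | hx'
          · subst e; simp [ne_of_gt hlt]
          · have : c < x := lt_of_lt_of_le hlt (hw x hx')
            simp [ne_of_gt this]
        rw [hcnt, hfil, pvG]
        push_cast
        split_ifs <;> omega

lemma pvB_eq_pvG (l : List String) (hp : l.Pairwise (· ≤ ·)) :
    (if 3 ≤ (l.foldl pvStep (0, none, 0)).2.2 then (l.foldl pvStep (0, none, 0)).1 + 1
     else (l.foldl pvStep (0, none, 0)).1) = pvG l := by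
  cases l with
  | nil => norm_num [pvG]
  | cons w t =>
      have hw : ∀ x ∈ t, w ≤ x := (List.pairwise_cons.mp hp).1
      have hpt : t.Pairwise (· ≤ ·) := (List.pairwise_cons.mp hp).2
      have hstep : pvStep ((0 : Int), (none : Option String), (0 : Int)) w = (0, some w, 1) := by
        simp [pvStep]
      rw [List.foldl_cons, hstep, pvFold t hpt 0 w 1 le_rfl hw, pvG]
      rw [zero_add]

lemma pvOfList_cons (w : String) (t : List String) :
    PySem.Set.ofList (w :: t) = w :: (PySem.Set.ofList t).filter (fun y => decide (y ≠ w)) := by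
  have h : PySem.Set.ofList (w :: t) = PySem.Set.update [w] t := rfl
  rw [h, PySem.Set.update_eq_append_filter]
  have : ∀ y : String, (!(PySem.Set.contains [w] y)) = decide (y ≠ w) := by
    intro y
    by_cases hy : y = w <;> simp [PySem.Set.contains, hy]
  simp only [this]
  rfl

lemma pvG_count : ∀ (n : Nat) (l : List String), l.length ≤ n →
    pvG l = ((PySem.Set.ofList l).countP (fun k => decide (3 ≤ (l.count k : Int))) : Int) := by
  intro n
  induction n with
  | zero =>
      intro l hl
      have : l = [] := List.eq_nil_of_length_eq_zero (Nat.le_zero.mp hl)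
      subst this
      simp [pvG]
  | succ n ih =>
      intro l hl
      cases l with
      | nil => simp [pvG]
      | cons w t =>
        have hlen : (t.filter (fun x => decide (x ≠ w))).length ≤ n :=
          le_trans (List.length_filter_le _ _) (Nat.succ_le_succ_iff.mp (by simpa using hl))
        rw [pvG, pvOfList_cons, List.countP_cons, ih _ hlen]
        have hpw : (decide (3 ≤ (((w :: t).count w : Nat) : Int))) = (decide (3 ≤ 1 + (t.count w : Int))) := by
          rw [List.count_cons_self]
          apply decide_eq_decide.mpr
          push_cast; omega
        have hmid : List.countP (fun k => decide (3 ≤ ((t.filter (fun x => decide (x ≠ w))).count k : Int)))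
              (PySem.Set.ofList (t.filter (fun x => decide (x ≠ w))))
            = List.countP (fun k => decide (3 ≤ (((w :: t).count k : Nat) : Int)))
              ((PySem.Set.ofList t).filter (fun y => decide (y ≠ w))) := by
          have e1 : List.countP (fun k => decide (3 ≤ ((t.filter (fun x => decide (x ≠ w))).count k : Int)))
                (PySem.Set.ofList (t.filter (fun x => decide (x ≠ w))))
              = List.countP (fun k => decide (3 ≤ (t.count k : Int)))
                (PySem.Set.ofList (t.filter (fun x => decide (x ≠ w)))) := by
            apply List.countP_congr
            intro k hk
            have hk' : k ∈ t.filter (fun x => decide (x ≠ w)) := (PySem.Set.mem_ofList _ _).mp hk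
            have hq : (fun x => decide (x ≠ w)) k = true := (List.mem_filter.mp hk').2
            have hc : (t.filter (fun x => decide (x ≠ w))).count k = t.count k := by
              rw [List.count_filter (p := fun x => decide (x ≠ w)) hq]
            rw [hc]
          have e2 : List.countP (fun k => decide (3 ≤ (((w :: t).count k : Nat) : Int)))
                ((PySem.Set.ofList t).filter (fun y => decide (y ≠ w)))
              = List.countP (fun k => decide (3 ≤ (t.count k : Int)))
                ((PySem.Set.ofList t).filter (fun y => decide (y ≠ w))) := by
            apply List.countP_congr
            intro k hk
            have hkw : k ≠ w := by
              have := (List.mem_filter.mp hk).2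
              simpa using this
            have hc2 : (w :: t).count k = t.count k := by
              simp [List.count_cons]
              exact fun e => hkw e.symm
            rw [hc2]
          have hperm : (PySem.Set.ofList (t.filter (fun x => decide (x ≠ w)))).Perm
              ((PySem.Set.ofList t).filter (fun y => decide (y ≠ w))) := by
            rw [List.perm_ext_iff_of_nodup (PySem.Set.nodup_ofList _)
              ((PySem.Set.nodup_ofList t).filter _)]
            intro a
            simp [PySem.Set.mem_ofList, List.mem_filter]
          rw [e1, e2, hperm.countP_eq]
        rw [hmid]
        push_cast [hpw]
        simp only [decide_eq_true_eq]
        ring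

set_option maxHeartbeats 1000000 in
lemma pvA_eq (prompt : String) :
    count_redundancy_py prompt
      = (((PySem.Set.ofList ((PySem.Str.split₀ (PySem.Str.lower prompt)).filter
            (fun w => 3 < PySem.Str.len w))).countP
          (fun k => decide (3 ≤ (((PySem.Str.split₀ (PySem.Str.lower prompt)).filter
            (fun w => 3 < PySem.Str.len w)).count k : Int)))) : Int) := by
  have hbody : count_redundancy_py prompt
      = List.foldl (fun acc c => if 3 ≤ c then acc + 1 else acc) 0
        (List.foldl
          (fun (d : PySem.Dict String Int) (w : String) =>
            if 3 < PySem.Str.len w then d.insert w (d.getD w 0 + 1) else d)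
          PySem.Dict.empty (PySem.Str.split₀ (PySem.Str.lower prompt))).values := rfl
  have hf : List.foldl
      (fun (d : PySem.Dict String Int) (w : String) =>
        if 3 < PySem.Str.len w then d.insert w (d.getD w 0 + 1) else d)
      PySem.Dict.empty (PySem.Str.split₀ (PySem.Str.lower prompt))
    = List.foldl (fun (d : PySem.Dict String Int) (w : String) => d.insert w (d.getD w 0 + 1))
      PySem.Dict.empty
      ((PySem.Str.split₀ (PySem.Str.lower prompt)).filter (fun w => 3 < PySem.Str.len w)) := by
    rw [List.foldl_filter]
    congr 1
    funext d w
    by_cases h : 3 < PySem.Str.len w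
    · simp
    · simp
  rw [hbody, hf, PySem.Dict.foldl_insert_getD_add_one_eq_counter]
  set fws := (PySem.Str.split₀ (PySem.Str.lower prompt)).filter (fun w => 3 < PySem.Str.len w) with hfws
  have hv : (PySem.Dict.counter fws).values
      = ((PySem.Set.ofList fws).map (fun k => (k, ((fws.count k : Nat) : Int)))).map Prod.snd := by
    rw [← PySem.Dict.items_counter]
    rfl
  rw [hv, List.map_map, PySem.List.foldl_ite_add_one (fun c : Int => (3 : Int) ≤ c),
    List.countP_map, zero_add]
  exact congrArg (fun n : Nat => (n : Int)) (List.countP_congr (fun k _ => Iff.rfl))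

-- ===== VERDICT (by name: the statement is the Claim_ definition above) =====
theorem count_redundancy_py_spec : Claim_equal_count_redundancy_py := by
  intro prompt _
  unfold Spec_count_redundancy_py
  rw [pvA_eq]
  have halt : count_redundancy_py_alt prompt
      = (if 3 ≤ ((PySem.List.sorted
            ((PySem.Str.split₀ (PySem.Str.lower prompt)).filter (fun w => 3 < PySem.Str.len w))
            (fun x => x) false).foldl pvStep (0, none, 0)).2.2
         then ((PySem.List.sorted
            ((PySem.Str.split₀ (PySem.Str.lower prompt)).filter (fun w => 3 < PySem.Str.len w))
            (fun x => x) false).foldl pvStep (0, none, 0)).1 + 1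
         else ((PySem.List.sorted
            ((PySem.Str.split₀ (PySem.Str.lower prompt)).filter (fun w => 3 < PySem.Str.len w))
            (fun x => x) false).foldl pvStep (0, none, 0)).1) := rfl
  rw [halt]
  set fws := (PySem.Str.split₀ (PySem.Str.lower prompt)).filter (fun w => 3 < PySem.Str.len w) with hfws
  set l := PySem.List.sorted fws (fun x => x) false with hl
  have hpair : l.Pairwise (· ≤ ·) := by
    simpa using PySem.List.sorted_pairwise fws (fun x => x)
  rw [pvB_eq_pvG l hpair, pvG_count l.length l le_rfl]
  have hperm : l.Perm fws := PySem.List.sorted_perm fws (fun x => x) false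
  have hpred : (fun k => decide (3 ≤ (l.count k : Int)))
      = (fun k => decide (3 ≤ (fws.count k : Int))) := by
    funext k; rw [hperm.count_eq]
  rw [hpred]
  have hset : (PySem.Set.ofList fws).Perm (PySem.Set.ofList l) := by
    rw [List.perm_ext_iff_of_nodup (PySem.Set.nodup_ofList _) (PySem.Set.nodup_ofList _)]
    intro a
    rw [PySem.Set.mem_ofList, PySem.Set.mem_ofList, hperm.mem_iff]
  rw [hset.countP_eq]
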